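-- pv_equiv track=rewrite | github.com/wnmgo/trace-har | src/trace_har/converter.py | _charset_from_mime
-- ===== SOURCE A (Python) =====
-- def _charset_from_mime(mime_type: str | None) -> str | None:
--     if not mime_type:
--         return None
--     parts = [part.strip() for part in mime_type.split(";")]
--     for part in parts[1:]:
--         if part.lower().startswith("charset="):
--             return part.split("=", 1)[1].strip()
--     return None
-- ===== SOURCE B (Python) =====
-- def _charset_from_mime(mime_type):
--     if not mime_type:
--         return None
--     params = {}
--     for part in mime_type.split(";")[1:]:
--         stripped = part.strip()
--         name, sep, value = stripped.partition("=")
--         if sep: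
--             params.setdefault(name.lower(), value.strip())
--     return params.get("charset")
-- ===== Notes on version B (the rewrite author's own statement) =====
-- stated objective: idiomatic
-- what changed: B builds a parameters dictionary in one pass over the parameter segments (partitioning each segment on its first equals sign, with setdefault keeping the first occurrence) and answers with a single dictionary lookup of the charset key, instead of A's early-exit scan that tests each segment's lowercased prefix.
import Mathlib
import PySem

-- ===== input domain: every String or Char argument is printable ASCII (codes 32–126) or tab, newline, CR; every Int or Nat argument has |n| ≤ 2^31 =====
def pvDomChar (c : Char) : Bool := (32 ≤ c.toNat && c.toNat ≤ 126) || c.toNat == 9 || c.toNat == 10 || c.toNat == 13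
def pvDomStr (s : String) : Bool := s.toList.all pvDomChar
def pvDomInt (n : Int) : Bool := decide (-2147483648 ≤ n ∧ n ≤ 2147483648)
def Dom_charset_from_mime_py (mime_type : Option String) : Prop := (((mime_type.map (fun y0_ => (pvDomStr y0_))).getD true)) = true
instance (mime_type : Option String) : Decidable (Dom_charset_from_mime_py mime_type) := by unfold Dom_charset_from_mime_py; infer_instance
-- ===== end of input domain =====

-- B replaces A's early-exit prefix-test scan by building a parameters dict once (partition each
-- segment at its first equals sign, setdefault keeps the first occurrence) and answering with a
-- single dict lookup of the charset key — idiomatic, same cost.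

-- ===== PORT A =====
-- A's for-loop over parts[1:] with its early return
def aScan : List (List Char) → Option (List Char)
  | [] => none
  | p :: rest =>
    if PySem.Chars.startswith (PySem.Chars.lower p) "charset=".toList then
      some (PySem.Chars.strip ((PySem.Chars.splitOnMax p ['='] 1).getD 1 []))
    else aScan rest

def charset_from_mime_py (mime_type : Option String) : Option String :=
  match mime_type with
  | none => none
  | some s =>
    if s = "" then none
    else
      let parts := (PySem.Chars.splitOn s.toList [';']).map PySem.Chars.strip
      (aScan (PySem.List.slice parts (some 1) none)).map String.ofList

-- ===== PORT B =====
-- B's dict-building loop; str.partition("=") with the ONE-CHARACTER separator '=' is exactly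
-- (chars before the first '=', the first '=' if present, chars after it) — ported by hand here
-- as takeWhile (· ≠ '=') / dropWhile (· ≠ '=') / its tail, which is exact for a 1-char separator
def bBuild (d : PySem.Dict (List Char) (List Char)) :
    List (List Char) → PySem.Dict (List Char) (List Char)
  | [] => d
  | part :: rest =>
    let p := PySem.Chars.strip part
    let name := p.takeWhile (· ≠ '=')
    let sep := p.dropWhile (· ≠ '=')
    if sep ≠ [] then
      bBuild (d.setdefault (PySem.Chars.lower name) (PySem.Chars.strip sep.tail)) rest
    else
      bBuild d rest

def charset_from_mime_py_alt (mime_type : Option String) : Option String :=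
  match mime_type with
  | none => none
  | some s =>
    if s = "" then none
    else
      ((bBuild PySem.Dict.empty
          (PySem.List.slice (PySem.Chars.splitOn s.toList [';']) (some 1) none)).get?
        "charset".toList).map String.ofList

-- ===== PRECONDITION & SPEC =====
def Spec_charset_from_mime_py (mime_type : Option String) (out : Option String) : Prop := out = charset_from_mime_py_alt mime_type
instance (mime_type : Option String) (out : Option String) : Decidable (Spec_charset_from_mime_py mime_type out) := by unfold Spec_charset_from_mime_py; infer_instance

-- ===== CLAIM (what is proved, stated in full; the proofs are below) =====
def Claim_equal_charset_from_mime_py : Prop := ∀ (mime_type : Option String), Dom_charset_from_mime_py mime_type → Spec_charset_from_mime_py mime_type (charset_from_mime_py mime_type)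

-- ===== LEMMAS AND PROOFS =====

-- no character maps to '=' under lowerChar except '=' itself
theorem lowerChar_eq_eq_iff (c : Char) : PySem.Chars.lowerChar c = '=' ↔ c = '=' := by
  constructor
  · intro h
    by_cases hu : PySem.Chars.isupper c = true
    · exfalso
      simp [PySem.Chars.lowerChar, hu] at h
      simp [PySem.Chars.isupper, Char.le_def] at hu
      have hb : 65 ≤ c.toNat ∧ c.toNat ≤ 90 := by
        unfold Char.toNat; constructor <;> [exact hu.1; exact hu.2]
      have hv : (c.toNat + 32).isValidChar := by left; omega
      have ht : (Char.ofNat (c.toNat + 32)).toNat = c.toNat + 32 := by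
        rw [Char.toNat_ofNat, if_pos hv]
      have h61 : ('=' : Char).toNat = 61 := rfl
      rw [← h] at h61
      omega
    · simpa [PySem.Chars.lowerChar, hu] using h
  · intro h; subst h; decide

theorem go_zero (sep : List Char) (fuel : Nat) (l cur : List Char) (acc : List (List Char)) :
    PySem.Chars.splitOnMax.go sep fuel 0 l cur acc = acc.reverse ++ [cur.reverse ++ l] := by
  cases fuel with
  | zero => simp [PySem.Chars.splitOnMax.go]
  | succ n => cases l with
    | nil => simp [PySem.Chars.splitOnMax.go]
    | cons c rest => simp [PySem.Chars.splitOnMax.go]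

theorem go_one (l : List Char) : ∀ (fuel : Nat) (cur : List Char) (acc : List (List Char)),
    l.length < fuel →
    PySem.Chars.splitOnMax.go ['='] fuel 1 l cur acc =
      if '=' ∈ l then
        acc.reverse ++ [cur.reverse ++ l.takeWhile (· ≠ '='), (l.dropWhile (· ≠ '=')).tail]
      else acc.reverse ++ [cur.reverse ++ l] := by
  induction l with
  | nil =>
    intro fuel cur acc h
    cases fuel with
    | zero => omega
    | succ n => simp [PySem.Chars.splitOnMax.go]
  | cons c rest ih =>
    intro fuel cur acc h
    cases fuel with
    | zero => omega
    | succ n =>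
      by_cases hc : c = '='
      · subst hc
        simp only [PySem.Chars.splitOnMax.go]
        rw [if_neg (by decide)]
        rw [if_pos (by simp [List.isPrefixOf])]
        simp [go_zero]
      · simp only [PySem.Chars.splitOnMax.go]
        rw [if_neg (by decide)]
        rw [if_neg (by simp [List.isPrefixOf]; exact fun e => hc e.symm)]
        rw [ih n (c :: cur) acc (by simpa using h)]
        by_cases hm : '=' ∈ rest
        · simp [hm, hc]
        · simp [hm, hc, ne_comm]

-- part.split("=", 1) characterised by the position of the first '='
theorem splitOnMax_one (p : List Char) :
    PySem.Chars.splitOnMax p ['='] 1 =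
      if '=' ∈ p then [p.takeWhile (· ≠ '='), (p.dropWhile (· ≠ '=')).tail]
      else [p] := by
  unfold PySem.Chars.splitOnMax
  rw [if_neg (by norm_num)]
  rw [show (1 : Int).toNat = 1 from rfl, go_one p (p.length + 1) [] [] (by omega)]
  split <;> simp

theorem takeWhile_ne_cons (c : Char) (t : List Char) :
    (c :: t).takeWhile (· ≠ '=') =
      if c = '=' then [] else c :: t.takeWhile (· ≠ '=') := by
  by_cases hc : c = '='
  · rw [List.takeWhile_cons, if_neg (by simp [hc]), if_pos hc]
  · rw [List.takeWhile_cons, if_pos (by simp [hc]), if_neg hc]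

theorem prefix_eq_char (w : List Char) : ∀ q : List Char, (∀ x ∈ w, x ≠ '=') →
    ((w ++ ['=']).isPrefixOf q = true ↔ '=' ∈ q ∧ q.takeWhile (· ≠ '=') = w) := by
  induction w with
  | nil =>
    intro q _
    cases q with
    | nil => simp
    | cons c t =>
      rw [takeWhile_ne_cons]
      by_cases hc : c = '='
      · subst hc; simp [List.isPrefixOf]
      · simp [List.isPrefixOf, hc, ne_comm]
  | cons a w' ih =>
    intro q hw
    have ha : a ≠ '=' := hw a (by simp)
    cases q with
    | nil => simp
    | cons c t =>
      rw [takeWhile_ne_cons]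
      by_cases hc : c = a
      · subst hc
        show (c :: (w' ++ ['='])).isPrefixOf (c :: t) = true ↔ _
        rw [List.isPrefixOf_cons₂_self, ih t (fun x hx => hw x (by simp [hx])), if_neg ha]
        constructor
        · rintro ⟨h1, h2⟩
          exact ⟨by simp [h1], by rw [h2]⟩
        · rintro ⟨h1, h2⟩
          have h2' := List.cons.inj h2
          refine ⟨?_, h2'.2⟩
          rcases List.mem_cons.mp h1 with h | h
          · exact absurd h.symm ha
          · exact h
      · constructor
        · intro h
          exfalso
          rcases (List.isPrefixOf_iff_prefix).mp h with ⟨r, hr⟩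
          rw [List.cons_append] at hr
          exact hc (List.cons.inj hr.symm).1
        · rintro ⟨h1, h2⟩
          by_cases he : c = '='
          · rw [if_pos he] at h2; exact absurd h2.symm (List.cons_ne_nil _ _)
          · rw [if_neg he] at h2; exact absurd (List.cons.inj h2).1 hc

theorem lower_mem_eq (p : List Char) : ('=' ∈ PySem.Chars.lower p ↔ '=' ∈ p) := by
  simp only [PySem.Chars.lower, List.mem_map]
  constructor
  · rintro ⟨c, hc, he⟩; rw [(lowerChar_eq_eq_iff c).mp he] at hc; exact hc
  · intro hm; exact ⟨'=', hm, (lowerChar_eq_eq_iff '=').mpr rfl⟩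

theorem lower_takeWhile (p : List Char) :
    (PySem.Chars.lower p).takeWhile (· ≠ '=') = PySem.Chars.lower (p.takeWhile (· ≠ '=')) := by
  simp only [PySem.Chars.lower, List.takeWhile_map]
  congr 2
  funext x
  simp [Function.comp, lowerChar_eq_eq_iff x]

-- A's per-part test, phrased as B's per-part key comparison
theorem cond_iff (p : List Char) :
    PySem.Chars.startswith (PySem.Chars.lower p) "charset=".toList = true ↔
      ('=' ∈ p ∧ PySem.Chars.lower (p.takeWhile (· ≠ '=')) = "charset".toList) := by
  have hsplit : "charset=".toList = "charset".toList ++ ['='] := rfl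
  have hne : ∀ x ∈ "charset".toList, x ≠ '=' := by
    rw [show "charset".toList = ['c','h','a','r','s','e','t'] from rfl]; simp
  rw [PySem.Chars.startswith, hsplit, prefix_eq_char _ _ hne, lower_mem_eq, lower_takeWhile]

-- loop invariant: B's final 'charset' entry is the accumulator's, else A's scan result
theorem bBuild_get (parts : List (List Char)) :
    ∀ d : PySem.Dict (List Char) (List Char),
    (bBuild d parts).get? "charset".toList =
      (d.get? "charset".toList).or (aScan (parts.map PySem.Chars.strip)) := by
  induction parts with
  | nil => intro d; exact Option.or_none.symm
  | cons part rest ih =>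
    intro d
    simp only [bBuild, aScan, List.map_cons]
    set p := PySem.Chars.strip part with hp
    by_cases hm : '=' ∈ p
    · have hsep : p.dropWhile (· ≠ '=') ≠ [] := by
        intro hnil
        rcases hm with _
        have := List.dropWhile_eq_nil_iff.mp hnil
        simpa using this '=' hm
      rw [if_pos hsep]
      by_cases hk : PySem.Chars.lower (p.takeWhile (· ≠ '=')) = "charset".toList
      · rw [if_pos ((cond_iff p).mpr ⟨hm, hk⟩)]
        rw [ih]
        rw [hk, PySem.Dict.get?_setdefault_self]
        have hv : PySem.Chars.strip ((PySem.Chars.splitOnMax p ['='] 1).getD 1 []) =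
            PySem.Chars.strip (p.dropWhile (· ≠ '=')).tail := by
          rw [splitOnMax_one, if_pos hm]; rfl
        rw [hv]
        cases h : d.get? "charset".toList <;> rfl
      · rw [if_neg (fun hc => hk ((cond_iff p).mp hc).2)]
        rw [ih, PySem.Dict.get?_setdefault_of_ne _ _ (Ne.symm hk)]
    · have hsep : ¬ p.dropWhile (· ≠ '=') ≠ [] := by
        simp only [ne_eq, not_not]
        apply List.dropWhile_eq_nil_iff.mpr
        intro x hx
        simp only [decide_eq_true_eq]
        intro he; subst he; exact hm hx
      rw [if_neg hsep]
      rw [if_neg (fun hc => hm ((cond_iff p).mp hc).1)]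
      exact ih d

-- ===== VERDICT (by name: the statement is the Claim_ definition above) =====
theorem charset_from_mime_py_spec : Claim_equal_charset_from_mime_py := by
  intro mime_type _
  unfold Spec_charset_from_mime_py
  cases mime_type with
  | none => rfl
  | some s =>
    unfold charset_from_mime_py charset_from_mime_py_alt
    dsimp only
    by_cases hs : s = ""
    · rw [if_pos hs, if_pos hs]
    · rw [if_neg hs, if_neg hs]
      rw [PySem.List.slice_from_one, PySem.List.slice_from_one]
      rw [bBuild_get, PySem.Dict.get?_empty]
      rw [← List.map_tail]
      rfl
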